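-- pv_equiv track=rewrite | github.com/Fantastic-Fanta/PokeMacro-MacOS | src/roam_text.py | find_closest_roaming
-- ===== SOURCE A (Python) =====
-- def find_closest_roaming(roaming_name: str, roaming_list: list) -> str:
--     if not roaming_name or not roaming_list:
--         return roaming_name.strip().lower() if roaming_name else ""
--     clean = roaming_name.strip().lower()
--     if not clean:
--         return ""
--     list_lower = [r.lower() for r in roaming_list]
--     if clean in list_lower:
--         return clean
--     best = ""
--     for item in list_lower:
--         if item in clean and len(item) > len(best):
--             best = item
--     if best:
--         return best
--     for item in list_lower:
--         if clean in item:
--             return item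
--     return clean
-- ===== SOURCE B (Python) =====
-- def find_closest_roaming(roaming_name: str, roaming_list: list) -> str:
--     clean = roaming_name.strip().lower()
--     if not roaming_list or not clean:
--         return clean
--     best = ""
--     sup = None
--     for r in roaming_list:
--         item = r.lower()
--         if len(item) > len(best) and item in clean:
--             best = item
--         if sup is None and clean in item:
--             sup = item
--     if best:
--         return best
--     if sup is not None:
--         return sup
--     return clean
-- ===== Notes on version B (the rewrite author's own statement) =====
-- stated objective: simpler
-- what changed: Collapses A's three leading guards into one, drops the separate membership pass (an exact match is found by the longest-substring rule anyway), and fuses A's scans into a single loop that tracks the longest substring match (guarded by a cheap length test before the substring test) and the first superstring match.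
import Mathlib
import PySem

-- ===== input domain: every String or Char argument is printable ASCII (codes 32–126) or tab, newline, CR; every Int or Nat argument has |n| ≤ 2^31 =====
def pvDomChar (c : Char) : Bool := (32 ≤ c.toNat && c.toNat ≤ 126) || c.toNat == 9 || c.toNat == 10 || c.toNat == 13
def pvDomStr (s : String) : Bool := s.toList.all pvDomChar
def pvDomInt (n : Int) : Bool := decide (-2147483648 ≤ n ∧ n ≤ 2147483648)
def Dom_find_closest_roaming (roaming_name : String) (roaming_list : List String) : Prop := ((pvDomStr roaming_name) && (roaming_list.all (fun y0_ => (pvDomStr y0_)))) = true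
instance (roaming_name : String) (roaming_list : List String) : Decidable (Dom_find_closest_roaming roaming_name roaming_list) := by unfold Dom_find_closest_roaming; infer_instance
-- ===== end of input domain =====

-- B collapses A's guards into one, fuses A's membership test and two scans into a single
-- loop tracking the longest substring match and the first superstring match (simpler, one pass).

-- ===== PORT A =====
def find_closest_roaming (roaming_name : String) (roaming_list : List String) : String :=
  if roaming_name = "" ∨ roaming_list = [] then
    (if roaming_name ≠ "" then PySem.Str.lower (PySem.Str.strip roaming_name) else "")
  else
    let clean := PySem.Str.lower (PySem.Str.strip roaming_name)
    if clean = "" then ""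
    else
      let list_lower := roaming_list.map PySem.Str.lower
      if clean ∈ list_lower then clean
      else
        let best := list_lower.foldl
          (fun best item =>
            if PySem.Str.isIn item clean = true ∧ PySem.Str.len best < PySem.Str.len item
            then item else best) ""
        if best ≠ "" then best
        else
          match list_lower.find? (fun item => PySem.Str.isIn clean item) with
          | some item => item
          | none => clean

-- ===== PORT B =====
def find_closest_roaming_alt (roaming_name : String) (roaming_list : List String) : String :=
  let clean := PySem.Str.lower (PySem.Str.strip roaming_name)
  if roaming_list = [] ∨ clean = "" then clean
  else
    let st := roaming_list.foldl
      (fun (st : String × Option String) r =>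
        let item := PySem.Str.lower r
        let best := if PySem.Str.len st.1 < PySem.Str.len item ∧ PySem.Str.isIn item clean = true
                    then item else st.1
        let sup := if st.2 = none ∧ PySem.Str.isIn clean item = true then some item else st.2
        (best, sup)) ("", none)
    if st.1 ≠ "" then st.1
    else
      match st.2 with
      | some s => s
      | none => clean

-- ===== PRECONDITION & SPEC =====
def Spec_find_closest_roaming (roaming_name : String) (roaming_list : List String) (out : String) : Prop := out = find_closest_roaming_alt roaming_name roaming_list
instance (roaming_name : String) (roaming_list : List String) (out : String) : Decidable (Spec_find_closest_roaming roaming_name roaming_list out) := by unfold Spec_find_closest_roaming; infer_instance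

-- ===== CLAIM (what is proved, stated in full; the proofs are below) =====
def Claim_equal_find_closest_roaming : Prop := ∀ (roaming_name : String) (roaming_list : List String), Dom_find_closest_roaming roaming_name roaming_list → Spec_find_closest_roaming roaming_name roaming_list (find_closest_roaming roaming_name roaming_list)

-- ===== LEMMAS AND PROOFS =====

-- A's best-update step (condition order as in Source A)
def pvF (c : String) (b i : String) : String :=
  if PySem.Str.isIn i c = true ∧ PySem.Str.len b < PySem.Str.len i then i else b

-- B's first-superstring step
def pvG (c : String) (s : Option String) (i : String) : Option String :=
  if s = none ∧ PySem.Str.isIn c i = true then some i else s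

theorem pvLen_le {i c : String} (h : PySem.Str.isIn i c = true) :
    PySem.Str.len i ≤ PySem.Str.len c := by
  have := (PySem.Str.isIn_iff_infix i c).mp h
  simp only [PySem.Str.len_eq]
  exact_mod_cast this.length_le

theorem pvF_self (c : String) : ∀ L : List String, L.foldl (pvF c) c = c := by
  intro L
  induction L with
  | nil => rfl
  | cons i L ih =>
    have hstep : pvF c c i = c := by
      have hno : ¬(PySem.Str.isIn i c = true ∧ PySem.Str.len c < PySem.Str.len i) :=
        fun hc => absurd hc.2 (not_lt.mpr (pvLen_le hc.1))
      unfold pvF; rw [if_neg hno]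
    rw [List.foldl_cons, hstep]; exact ih

theorem pvF_reach (c : String) : ∀ (L : List String) (b : String),
    PySem.Str.isIn b c = true → c ∈ L → L.foldl (pvF c) b = c := by
  intro L
  induction L with
  | nil => intro b _ h; cases h
  | cons i L ih =>
    intro b hb hm
    rcases List.mem_cons.mp hm with rfl | hm
    · -- i = c: the step yields c (directly or because b already equals c)
      have hcc : PySem.Str.isIn c c = true :=
        (PySem.Str.isIn_iff_infix c c).mpr (List.infix_refl _)
      have hbc : PySem.Str.len b ≤ PySem.Str.len c := pvLen_le hb
      by_cases hlt : PySem.Str.len b < PySem.Str.len c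
      · have hstep : pvF c b c = c := by unfold pvF; rw [if_pos ⟨hcc, hlt⟩]
        rw [List.foldl_cons, hstep]; exact pvF_self c L
      · have hbeq : b = c := by
          have hinf := (PySem.Str.isIn_iff_infix b c).mp hb
          have hlen : b.toList.length = c.toList.length := by
            have h1 := hinf.length_le
            simp only [PySem.Str.len_eq] at hbc hlt
            omega
          have := hinf.eq_of_length hlen
          exact String.toList_inj.mp this
        subst hbeq
        have hstep : pvF b b b = b := by
          have hno : ¬(PySem.Str.isIn b b = true ∧ PySem.Str.len b < PySem.Str.len b) :=
            fun hc => lt_irrefl _ hc.2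
          unfold pvF; rw [if_neg hno]
        rw [List.foldl_cons, hstep]; exact pvF_self b L
    · -- c occurs later; the step preserves the invariant
      have hinv : PySem.Str.isIn (pvF c b i) c = true := by
        unfold pvF; split_ifs with h
        · exact h.1
        · exact hb
      rw [List.foldl_cons]; exact ih _ hinv hm

theorem pvG_some (c : String) : ∀ (L : List String) (x : String),
    L.foldl (pvG c) (some x) = some x := by
  intro L
  induction L with
  | nil => intro x; rfl
  | cons i L ih =>
    intro x
    have : pvG c (some x) i = some x := by unfold pvG; rw [if_neg]; exact fun h => by cases h.1
    rw [List.foldl_cons, this]; exact ih x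

theorem pvG_find (c : String) : ∀ L : List String,
    L.foldl (pvG c) none = L.find? (fun i => PySem.Str.isIn c i) := by
  intro L
  induction L with
  | nil => rfl
  | cons i L ih =>
    rw [List.foldl_cons, List.find?_cons]
    by_cases h : PySem.Str.isIn c i = true
    · have : pvG c none i = some i := by unfold pvG; rw [if_pos ⟨rfl, h⟩]
      rw [this, pvG_some]
      simp only [PySem.Str.isIn] at h
      simp [h]
    · have : pvG c none i = none := by unfold pvG; rw [if_neg]; exact fun hc => h hc.2
      rw [this, ih]
      simp only [PySem.Str.isIn, Bool.not_eq_true] at h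
      simp [h]

-- B's fused loop decomposes into the two independent folds over the lowered list
theorem pvPair_fold (c : String) : ∀ (rl : List String) (b : String) (s : Option String),
    rl.foldl
      (fun (st : String × Option String) r =>
        let item := PySem.Str.lower r
        let best := if PySem.Str.len st.1 < PySem.Str.len item ∧ PySem.Str.isIn item c = true
                    then item else st.1
        let sup := if st.2 = none ∧ PySem.Str.isIn c item = true then some item else st.2
        (best, sup)) (b, s)
    = ((rl.map PySem.Str.lower).foldl (pvF c) b, (rl.map PySem.Str.lower).foldl (pvG c) s) := by
  intro rl
  induction rl with
  | nil => intro b s; rfl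
  | cons r rl ih =>
    intro b s
    rw [List.foldl_cons, List.map_cons, List.foldl_cons, List.foldl_cons]
    have hb : (if PySem.Str.len b < PySem.Str.len (PySem.Str.lower r) ∧
                  PySem.Str.isIn (PySem.Str.lower r) c = true
               then PySem.Str.lower r else b) = pvF c b (PySem.Str.lower r) := by
      unfold pvF; rw [if_congr and_comm rfl rfl]
    simp only []
    rw [hb]
    exact ih _ _

-- ===== VERDICT (by name: the statement is the Claim_ definition above) =====
theorem find_closest_roaming_spec : Claim_equal_find_closest_roaming := by
  intro n l _
  unfold Spec_find_closest_roaming find_closest_roaming find_closest_roaming_alt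
  by_cases hn : n = ""
  · subst hn
    have hc : PySem.Str.lower (PySem.Str.strip "") = "" := by decide
    simp [hc]
  · by_cases hl : l = []
    · subst hl; simp [hn]
    · simp only [hn, hl, or_self, if_false, not_false_iff, if_true, ne_eq, false_or]
      set c := PySem.Str.lower (PySem.Str.strip n) with hcdef
      by_cases hc : c = ""
      · simp [hc]
      · simp only [hc, if_false]
        rw [pvPair_fold c l "" none]
        by_cases hm : c ∈ l.map PySem.Str.lower
        · have hbest : (l.map PySem.Str.lower).foldl (pvF c) "" = c := by
            apply pvF_reach
            · rw [PySem.Str.isIn_iff_infix]; exact List.nil_infix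
            · exact hm
          have hfa : (l.map PySem.Str.lower).foldl
              (fun best item =>
                if PySem.Str.isIn item c = true ∧ PySem.Str.len best < PySem.Str.len item
                then item else best) "" = c := hbest
          simp [hm, hbest, hc]
        · have hfa : (fun (best item : String) =>
              if PySem.Str.isIn item c = true ∧ PySem.Str.len best < PySem.Str.len item
              then item else best) = pvF c := by
            funext b i; unfold pvF; rfl
          simp only [hm, if_false, hfa, pvG_find]
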